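-- pv_equiv track=rewrite | github.com/magus-warrior/caseMonster | main.py | _cap_special
-- ===== SOURCE A (Python) =====
-- def _cap_special(text: str) -> str:
--     fin: list[str] = []
--     caps = False
--
--     for char in text:
--         if char in ["\t", "\n", "\r"]:
--             fin.append(char)
--             caps = True
--         elif caps:
--             fin.append(char.upper())
--             caps = False
--         else:
--             fin.append(char)
--
--     return "".join(fin)
-- ===== SOURCE B (Python) =====
-- def _cap_special(text: str) -> str:
--     # Stateless pairwise pass: uppercase each char whose predecessor is tab/newline/CR.
--     # (upper() of a special char is itself, so adjacent specials behave like A's state machine.)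
--     return "".join(c.upper() if p in "\t\n\r" else c for p, c in zip("\0" + text, text))
-- ===== Notes on version B (the rewrite author's own statement) =====
-- stated objective: idiomatic
-- what changed: Replaced the mutable caps-flag state machine and list accumulator with a stateless pairwise comprehension over zip of the string with itself shifted by one, uppercasing each character whose predecessor is tab/newline/CR.
import Mathlib
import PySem

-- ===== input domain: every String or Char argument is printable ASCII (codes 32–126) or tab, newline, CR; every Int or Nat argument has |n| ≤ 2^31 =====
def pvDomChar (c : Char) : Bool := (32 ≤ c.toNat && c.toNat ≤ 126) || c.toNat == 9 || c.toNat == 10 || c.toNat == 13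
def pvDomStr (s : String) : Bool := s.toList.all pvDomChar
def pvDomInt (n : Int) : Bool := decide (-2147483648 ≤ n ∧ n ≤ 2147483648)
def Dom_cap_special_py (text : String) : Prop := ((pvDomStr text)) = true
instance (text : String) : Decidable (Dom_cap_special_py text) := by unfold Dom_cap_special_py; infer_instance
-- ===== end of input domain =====

-- B replaces A's caps-flag state machine by a stateless pairwise pass (idiomatic, same cost).

-- ===== PORT A =====
-- literal port of A: fold over the characters with state (fin, caps)
def cap_special_py (text : String) : String :=
  let r := text.toList.foldl
    (fun (st : List Char × Bool) char =>
      if char = '\t' ∨ char = '\n' ∨ char = '\r' then (st.1 ++ [char], true)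
      else if st.2 then (st.1 ++ [PySem.Chars.upperChar char], false)
      else (st.1 ++ [char], false))
    ([], false)
  String.mk r.1

-- ===== PORT B =====
-- literal port of Source B: map over zip of '\0'-prefixed text with text
def cap_special_py_alt (text : String) : String :=
  String.mk ((((Char.ofNat 0) :: text.toList).zip text.toList).map
    (fun pc => if pc.1 = '\t' ∨ pc.1 = '\n' ∨ pc.1 = '\r'
               then PySem.Chars.upperChar pc.2 else pc.2))

-- ===== PRECONDITION & SPEC =====
def Spec_cap_special_py (text : String) (out : String) : Prop := out = cap_special_py_alt text
instance (text : String) (out : String) : Decidable (Spec_cap_special_py text out) := by unfold Spec_cap_special_py; infer_instance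

-- ===== CLAIM (what is proved, stated in full; the proofs are below) =====
def Claim_equal_cap_special_py : Prop := ∀ (text : String), Dom_cap_special_py text → Spec_cap_special_py text (cap_special_py text)

-- ===== LEMMAS AND PROOFS =====

theorem cap_special_key (l : List Char) : ∀ (acc : List Char) (b : Bool) (p : Char),
    b = decide (p = '\t' ∨ p = '\n' ∨ p = '\r') →
    (l.foldl
      (fun (st : List Char × Bool) char =>
        if char = '\t' ∨ char = '\n' ∨ char = '\r' then (st.1 ++ [char], true)
        else if st.2 then (st.1 ++ [PySem.Chars.upperChar char], false)
        else (st.1 ++ [char], false))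
      (acc, b)).1
    = acc ++ ((p :: l).zip l).map
        (fun pc => if pc.1 = '\t' ∨ pc.1 = '\n' ∨ pc.1 = '\r'
                   then PySem.Chars.upperChar pc.2 else pc.2) := by
  induction l with
  | nil => intro acc b p _; simp
  | cons c t ih =>
    intro acc b p hb
    by_cases hc : c = '\t' ∨ c = '\n' ∨ c = '\r'
    · have hstep := ih (acc ++ [c]) true c (by simp [hc])
      simp only [List.foldl_cons, if_pos hc, hstep, List.zip_cons_cons, List.map_cons,
        List.append_assoc, List.singleton_append]
      by_cases hp : p = '\t' ∨ p = '\n' ∨ p = '\r'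
      · have : PySem.Chars.upperChar c = c := by
          rcases hc with h | h | h <;> subst h <;> decide
        simp [hp, this]
      · simp [hp]
    · subst hb
      by_cases hp : p = '\t' ∨ p = '\n' ∨ p = '\r'
      · have hstep := ih (acc ++ [PySem.Chars.upperChar c]) false c (by simp [hc])
        simp [hc, hp, hstep]
      · have hstep := ih (acc ++ [c]) false c (by simp [hc])
        simp [hc, hp, hstep]

-- ===== VERDICT (by name: the statement is the Claim_ definition above) =====
theorem cap_special_py_spec : Claim_equal_cap_special_py := by
  intro text _
  unfold Spec_cap_special_py cap_special_py cap_special_py_alt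
  have h := cap_special_key text.toList [] false (Char.ofNat 0) (by decide)
  simp [h]
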